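-- pv_equiv track=rewrite | github.com/zak-510/BerkeleyBets | mlb_backup_archive/archive/enhanced_inference.py | _games_since_good_game
-- ===== SOURCE A (Python) =====
-- def _games_since_good_game(fantasy_points, threshold=10):
--     """Calculate games since last good performance"""
--     try:
--         for i, points in enumerate(reversed(fantasy_points)):
--             if points >= threshold:
--                 return i
--         return min(len(fantasy_points), 10)  # Cap at 10
--     except:
--         return 5
-- ===== SOURCE B (Python) =====
-- def _games_since_good_game(fantasy_points, threshold=10):
--     try:
--         last_good = None
--         for i, points in enumerate(fantasy_points):
--             if points >= threshold:
--                 last_good = i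
--         if last_good is not None:
--             return len(fantasy_points) - 1 - last_good
--         return min(len(fantasy_points), 10)  # Cap at 10
--     except:
--         return 5
-- ===== Notes on version B (the rewrite author's own statement) =====
-- stated objective: alternative
-- what changed: Replaces the backward early-return scan over reversed(fantasy_points) with a single forward enumerate scan that records the last index meeting the threshold, then converts it to a distance from the end.
import Mathlib
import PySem

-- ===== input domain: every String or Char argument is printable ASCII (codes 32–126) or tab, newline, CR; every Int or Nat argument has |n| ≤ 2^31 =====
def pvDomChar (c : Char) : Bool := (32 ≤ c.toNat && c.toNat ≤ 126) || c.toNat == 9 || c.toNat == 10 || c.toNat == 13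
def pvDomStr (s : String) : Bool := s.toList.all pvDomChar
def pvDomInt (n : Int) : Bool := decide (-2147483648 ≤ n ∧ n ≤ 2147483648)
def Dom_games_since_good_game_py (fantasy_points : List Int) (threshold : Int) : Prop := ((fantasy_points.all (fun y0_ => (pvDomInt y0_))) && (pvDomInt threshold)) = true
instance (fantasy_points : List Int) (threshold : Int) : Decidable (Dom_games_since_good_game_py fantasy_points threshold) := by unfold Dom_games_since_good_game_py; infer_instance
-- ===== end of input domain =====

-- B replaces A's backward early-return scan with one forward scan recording the last good index (alternative decomposition, same cost).
-- On List Int inputs neither program can raise, so the bare except (return 5) is dead code and both are total.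

-- ===== PORT A =====
-- 'for i, points in enumerate(reversed(fantasy_points)): if points >= threshold: return i'
def pvALoop (l : List Int) (threshold : Int) (i : Int) : Option Int :=
  match l with
  | [] => none
  | points :: rest => if points ≥ threshold then some i else pvALoop rest threshold (i + 1)

def games_since_good_game_py (fantasy_points : List Int) (threshold : Int) : Int :=
  match pvALoop fantasy_points.reverse threshold 0 with
  | some i => i
  | none => min (fantasy_points.length : Int) 10

-- ===== PORT B =====
-- forward scan: last_good := i each time points ≥ threshold
def pvLastGood (fantasy_points : List Int) (threshold : Int) : Option Int :=
  (PySem.List.enumerate fantasy_points).foldl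
    (fun last_good p => if p.2 ≥ threshold then some p.1 else last_good) none

def games_since_good_game_py_alt (fantasy_points : List Int) (threshold : Int) : Int :=
  match pvLastGood fantasy_points threshold with
  | some j => (fantasy_points.length : Int) - 1 - j
  | none => min (fantasy_points.length : Int) 10

-- ===== PRECONDITION & SPEC =====
def Spec_games_since_good_game_py (fantasy_points : List Int) (threshold : Int) (out : Int) : Prop := out = games_since_good_game_py_alt fantasy_points threshold
instance (fantasy_points : List Int) (threshold : Int) (out : Int) : Decidable (Spec_games_since_good_game_py fantasy_points threshold out) := by unfold Spec_games_since_good_game_py; infer_instance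

-- ===== CLAIM (what is proved, stated in full; the proofs are below) =====
def Claim_equal_games_since_good_game_py : Prop := ∀ (fantasy_points : List Int) (threshold : Int), Dom_games_since_good_game_py fantasy_points threshold → Spec_games_since_good_game_py fantasy_points threshold (games_since_good_game_py fantasy_points threshold)

-- ===== LEMMAS AND PROOFS =====

theorem pvALoop_shift (l : List Int) (t i : Int) :
    pvALoop l t i = (pvALoop l t 0).map (fun j => j + i) := by
  induction l generalizing i with
  | nil => simp [pvALoop]
  | cons x xs ih =>
    simp only [pvALoop]
    by_cases h : x ≥ t
    · simp [h]
    · simp only [h, if_false]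
      rw [ih (i + 1), ih (0 + 1)]
      cases pvALoop xs t 0 with
      | none => rfl
      | some j => simp; ring

theorem pvLastGood_snoc (xs : List Int) (x t : Int) :
    pvLastGood (xs ++ [x]) t =
      (if x ≥ t then some (xs.length : Int) else pvLastGood xs t) := by
  unfold pvLastGood
  rw [PySem.List.enumerate_append, List.foldl_append]
  simp [PySem.List.enumerate]

theorem pvLastGood_eq (xs : List Int) (t : Int) :
    pvLastGood xs t = (pvALoop xs.reverse t 0).map (fun i => (xs.length : Int) - 1 - i) := by
  induction xs using List.reverseRecOn with
  | nil => simp [pvLastGood, pvALoop, PySem.List.enumerate]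
  | append_singleton ys x ih =>
    rw [pvLastGood_snoc, List.reverse_append]
    simp only [List.reverse_singleton, List.singleton_append, pvALoop]
    by_cases h : x ≥ t
    · simp [h]
    · simp only [h, if_false]
      rw [pvALoop_shift, ih]
      cases pvALoop ys.reverse t 0 with
      | none => rfl
      | some j => simp; ring

-- ===== VERDICT (by name: the statement is the Claim_ definition above) =====
theorem games_since_good_game_py_spec : Claim_equal_games_since_good_game_py := by
  intro fantasy_points threshold _
  unfold Spec_games_since_good_game_py games_since_good_game_py games_since_good_game_py_alt
  rw [pvLastGood_eq]
  cases h : pvALoop fantasy_points.reverse threshold 0 with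
  | none => simp
  | some i => simp
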